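-- pv_equiv track=rewrite | github.com/ElliottBarbeau/Leetcode | prepare the bunny's escape.py | every_map
-- ===== SOURCE A (Python) =====
-- def every_map(m):
--     # base map needs to be yielded
--     yield m
--
--     for i in range(len(m)):
--         for j in range(len(m[i])):
--             if m[i][j]:
--                 copy = [[column for column in row] for row in m]
--
--                 copy[i][j] = 0
--
--                 # yield every copy of the map replacing each 1 with a 0
--                 yield copy
-- ===== SOURCE B (Python) =====
-- def every_map(m):
--     # structural recursion on the grid: no indices, no copy-then-mutate;
--     # each variant is built front-to-back by consing rows/cells.
--     yield m
--     yield from _grid_variants(m)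
--
-- def _grid_variants(m):
--     # all variants of m with exactly one truthy cell zeroed, in reading order
--     if not m:
--         return
--     row, rest = m[0], m[1:]
--     for rv in _row_variants(row):
--         yield [rv] + [list(r) for r in rest]
--     for tv in _grid_variants(rest):
--         yield [list(row)] + tv
--
-- def _row_variants(row):
--     # all variants of row with exactly one truthy cell zeroed, left to right
--     if not row:
--         return
--     x, rest = row[0], row[1:]
--     if x:
--         yield [0] + rest
--     for rv in _row_variants(rest):
--         yield [x] + rv
-- ===== Notes on version B (the rewrite author's own statement) =====
-- stated objective: alternative
-- what changed: B replaces A's index-driven double range scan with copy-then-mutate by structural recursion: a recursive generator over the list of rows (and a recursive generator over each row) that builds every variant front-to-back by consing, with no indices and no mutation.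
import Mathlib
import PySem

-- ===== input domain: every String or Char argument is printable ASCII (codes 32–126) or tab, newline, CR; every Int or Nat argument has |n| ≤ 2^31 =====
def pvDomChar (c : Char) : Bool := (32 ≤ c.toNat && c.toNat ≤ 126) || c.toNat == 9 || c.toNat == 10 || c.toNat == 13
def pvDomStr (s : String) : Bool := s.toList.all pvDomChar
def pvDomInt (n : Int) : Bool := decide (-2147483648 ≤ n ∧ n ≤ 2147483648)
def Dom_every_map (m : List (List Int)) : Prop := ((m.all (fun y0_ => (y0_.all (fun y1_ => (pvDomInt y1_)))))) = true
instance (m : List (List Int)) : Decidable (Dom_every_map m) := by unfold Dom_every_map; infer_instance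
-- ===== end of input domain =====

-- B replaces A's index-driven double range scan with copy-then-mutate by structural
-- recursion on the list of rows (and on each row), building every variant by consing;
-- 'alternative' decomposition, same cost. The generators are ported as the list of
-- yielded values (return-value equivalence).

-- ===== PORT A =====
-- copy = [[column for column in row] for row in m] copies values only, so the
-- copy-then-assign 'copy[i][j] = 0' is ported as nested pySetD on m itself (exact).
def aCopy (m : List (List Int)) (i j : Int) : List (List Int) :=
  PySem.List.pySetD m i (PySem.List.pySetD (PySem.List.pyGetD m i []) j 0)

def every_map (m : List (List Int)) : List (List (List Int)) :=
  (PySem.List.pyRange 0 m.length 1).foldl (fun acc i =>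
    (PySem.List.pyRange 0 (PySem.List.pyGetD m i []).length 1).foldl (fun acc2 j =>
      if PySem.List.pyGetD (PySem.List.pyGetD m i []) j 0 ≠ 0 then acc2 ++ [aCopy m i j]
      else acc2) acc) [m]

-- ===== PORT B =====
-- _row_variants: every variant of the row with one truthy cell zeroed, left to right
-- ([0] + rest when the head is truthy, then the tail's variants re-headed with x)
def rowVariants : List Int → List (List Int)
  | [] => []
  | x :: rest =>
    (if x ≠ 0 then [(0 : Int) :: rest] else []) ++ (rowVariants rest).map (fun rv => x :: rv)

-- _grid_variants: the head row's variants over the unchanged tail, then the tail's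
-- variants under the unchanged head ([list(r) for r in rest] / list(row) copy values only)
def gridVariants : List (List Int) → List (List (List Int))
  | [] => []
  | row :: rest =>
    (rowVariants row).map (fun rv => rv :: rest) ++ (gridVariants rest).map (fun tv => row :: tv)

def every_map_alt (m : List (List Int)) : List (List (List Int)) :=
  m :: gridVariants m

-- ===== PRECONDITION & SPEC =====
def Spec_every_map (m : List (List Int)) (out : List (List (List Int))) : Prop := out = every_map_alt m
instance (m : List (List Int)) (out : List (List (List Int))) : Decidable (Spec_every_map m out) := by unfold Spec_every_map; infer_instance

-- ===== CLAIM (what is proved, stated in full; the proofs are below) =====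
def Claim_equal_every_map : Prop := ∀ (m : List (List Int)), Dom_every_map m → Spec_every_map m (every_map m)

-- ===== LEMMAS AND PROOFS =====

-- Nat-indexed middle form both sides are reduced to.
def natSpec (m : List (List Int)) : List (List (List Int)) :=
  (List.range m.length).flatMap (fun i =>
    ((List.range (m.getD i []).length).filter (fun j => (m.getD i []).getD j 0 != 0)).map
      (fun j => m.set i ((m.getD i []).set j 0)))

-- A's nested fold, flattened to the enumerate shape.
theorem every_map_eq (m : List (List Int)) :
    every_map m = m :: (PySem.List.enumerate m 0).flatMap (fun p =>
      ((PySem.List.enumerate p.2 0).filter (fun q => q.2 != 0)).map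
        (fun q => aCopy m p.1 q.1)) := by
  unfold every_map
  have inner : ∀ (i : Int) (acc : List (List (List Int))),
      (PySem.List.pyRange 0 (PySem.List.pyGetD m i []).length 1).foldl (fun acc2 j =>
        if PySem.List.pyGetD (PySem.List.pyGetD m i []) j 0 ≠ 0 then acc2 ++ [aCopy m i j]
        else acc2) acc
      = acc ++ ((PySem.List.enumerate (PySem.List.pyGetD m i []) 0).filter
          (fun q => q.2 != 0)).map (fun q => aCopy m i q.1) := by
    intro i acc
    set row := PySem.List.pyGetD m i ([] : List Int) with hrow
    have he : PySem.List.enumerate row 0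
        = (PySem.List.pyRange 0 row.length 1).map (fun j => (j, PySem.List.pyGetD row j 0)) :=
      PySem.List.enumerate_eq_map_pyRange row 0
    rw [he, List.filter_map, List.map_map, ← PySem.List.foldl_append_if
      (fun j => ((fun q => q.2 != 0) ∘ fun j => (j, PySem.List.pyGetD row j 0)) j)
      (fun j => ((fun q => aCopy m i q.1) ∘ fun j => (j, PySem.List.pyGetD row j 0)) j)]
    apply PySem.List.foldl_congr_mem
    intro acc2 j _
    simp only [Function.comp]
    by_cases h : PySem.List.pyGetD row j 0 = 0 <;> simp [h]
  have he : PySem.List.enumerate m 0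
      = (PySem.List.pyRange 0 m.length 1).map (fun i => (i, PySem.List.pyGetD m i [])) :=
    PySem.List.enumerate_eq_map_pyRange m ([] : List Int)
  rw [he, List.flatMap_map]
  have : ∀ acc, (PySem.List.pyRange 0 (m.length : Int) 1).foldl (fun acc i =>
      (PySem.List.pyRange 0 (PySem.List.pyGetD m i []).length 1).foldl (fun acc2 j =>
        if PySem.List.pyGetD (PySem.List.pyGetD m i []) j 0 ≠ 0 then acc2 ++ [aCopy m i j]
        else acc2) acc) acc
      = acc ++ (PySem.List.pyRange 0 (m.length : Int) 1).flatMap (fun i =>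
          ((PySem.List.enumerate (PySem.List.pyGetD m i []) 0).filter
            (fun q => q.2 != 0)).map (fun q => aCopy m i q.1)) := by
    intro acc
    rw [← PySem.List.foldl_append_eq_flatMap]
    apply PySem.List.foldl_congr_mem
    intro acc2 i _
    exact inner i acc2
  rw [this]
  rfl

-- A's flattened form is the Nat-indexed middle form.
theorem every_map_eq_natSpec (m : List (List Int)) :
    every_map m = m :: natSpec m := by
  rw [every_map_eq]
  congr 1
  unfold natSpec
  rw [PySem.List.enumerate_eq_map_pyRange m ([] : List Int), PySem.List.len_eq,
    PySem.List.pyRange_zero_natCast, List.map_map, List.flatMap_map]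
  apply List.flatMap_congr
  intro i hi
  have hi' : i < m.length := List.mem_range.mp hi
  have hrow : PySem.List.pyGetD m ((i : Nat) : Int) ([] : List Int) = m.getD i [] := by
    simp [PySem.List.pyGetD_natCast]
  simp only [Function.comp, hrow]
  rw [PySem.List.enumerate_eq_map_pyRange (m.getD i []) (0 : Int), PySem.List.len_eq,
    PySem.List.pyRange_zero_natCast, List.map_map, List.filter_map, List.map_map]
  have hfil : (List.range (m.getD i []).length).filter
      ((fun q => q.2 != 0) ∘ ((fun j => ((j : Int), PySem.List.pyGetD (m.getD i []) j 0)) ∘ Nat.cast))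
      = (List.range (m.getD i []).length).filter (fun j => (m.getD i []).getD j 0 != 0) := by
    apply List.filter_congr
    intro j _
    simp [Function.comp, PySem.List.pyGetD_natCast]
  rw [hfil]
  apply List.map_congr_left
  intro j _
  simp [Function.comp, aCopy, PySem.List.pyGetD_natCast, PySem.List.pySetD_natCast]

-- B's row recursion is the Nat-indexed row form.
theorem rowVariants_eq (row : List Int) :
    rowVariants row
      = ((List.range row.length).filter (fun j => row.getD j 0 != 0)).map
          (fun j => row.set j 0) := by
  induction row with
  | nil => simp [rowVariants]
  | cons x rest ih =>
    rw [rowVariants, List.length_cons, List.range_succ_eq_map, List.filter_cons]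
    have hT : ((List.range rest.length).map Nat.succ).filter
        (fun j => (x :: rest).getD j 0 != 0)
        = ((List.range rest.length).filter (fun j => rest.getD j 0 != 0)).map Nat.succ := by
      rw [List.filter_map]
      congr 1
    have hmap : ((((List.range rest.length).filter
        (fun j => rest.getD j 0 != 0)).map Nat.succ).map (fun j => (x :: rest).set j 0))
        = (rowVariants rest).map (fun rv => x :: rv) := by
      rw [ih, List.map_map, List.map_map]
      apply List.map_congr_left
      intro j _
      simp [Function.comp]
    rw [hT]
    by_cases hx : x = 0
    · subst hx
      rw [if_neg (fun h => h rfl), List.nil_append, List.getD_cons_zero,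
        if_neg (by decide : ¬ (((0 : Int) != 0) = true))]
      exact hmap.symm
    · rw [if_pos hx, List.getD_cons_zero,
        if_pos (by simpa using hx : ((x != 0) = true)), List.map_cons, List.set_cons_zero,
        ← hmap]
      rfl

-- B's grid recursion is the Nat-indexed middle form.
theorem gridVariants_eq (m : List (List Int)) : gridVariants m = natSpec m := by
  induction m with
  | nil => simp [gridVariants, natSpec]
  | cons row rest ih =>
    rw [gridVariants, natSpec, List.length_cons, List.range_succ_eq_map,
      List.flatMap_cons, List.flatMap_map]
    congr 1
    · rw [rowVariants_eq, List.map_map]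
      rfl
    · rw [ih]
      unfold natSpec
      rw [List.map_flatMap]
      apply List.flatMap_congr
      intro i _
      rw [List.map_map]
      rfl

-- ===== VERDICT (by name: the statement is the Claim_ definition above) =====
theorem every_map_spec : Claim_equal_every_map := by
  intro m _
  unfold Spec_every_map every_map_alt
  rw [every_map_eq_natSpec, gridVariants_eq]
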